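-- pv_equiv track=rewrite | github.com/Sayberol/pythonProject10 | coursework/funcs.py | tag_content
-- ===== SOURCE A (Python) =====
-- def tag_content(content):
--
--     words = content.split(" ")
--     for i, word in enumerate(words):
--         if word.startswith('#'):
--             tag = word.replace("#", "")
--             link = f"<a href='/tag/{tag}'>{word}</a>"
--             words[i] = link
--
--     return " ".join(words)
-- ===== SOURCE B (Python) =====
-- def tag_content(content):
--     rest = content
--     out = []
--     while True:
--         j = rest.find(' ')
--         tok = rest if j == -1 else rest[:j]
--         if tok.startswith('#'):
--             out.append(f"<a href='/tag/{tok.replace('#', '')}'>{tok}</a>")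
--         else:
--             out.append(tok)
--         if j == -1:
--             break
--         out.append(' ')
--         rest = rest[j + 1:]
--     return ''.join(out)
-- ===== Notes on version B (the rewrite author's own statement) =====
-- stated objective: alternative
-- what changed: B replaces A's split-into-a-word-list / enumerate-and-mutate / rejoin pipeline with a single left-to-right scan that finds the next space, emits each token (wrapped in the link if it starts with '#') and the separator as it goes.
import Mathlib
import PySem

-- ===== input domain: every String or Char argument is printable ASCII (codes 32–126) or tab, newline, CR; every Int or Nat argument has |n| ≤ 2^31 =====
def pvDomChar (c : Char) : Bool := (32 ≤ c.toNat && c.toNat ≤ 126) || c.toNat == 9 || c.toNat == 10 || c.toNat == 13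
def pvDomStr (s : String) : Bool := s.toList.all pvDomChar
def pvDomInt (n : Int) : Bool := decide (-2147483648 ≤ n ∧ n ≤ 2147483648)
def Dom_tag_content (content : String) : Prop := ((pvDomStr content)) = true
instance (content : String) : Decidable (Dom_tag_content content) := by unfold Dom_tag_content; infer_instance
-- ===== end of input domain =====

-- B replaces A's split-into-list / mutate-list / join with a single left-to-right scan that
-- finds each space-delimited token and emits output as it goes (objective: alternative).

-- the f-string "<a href='/tag/{tag}'>{word}</a>" (shared literal text of both Pythons)
def pvLink (tag word : List Char) : List Char :=
  "<a href='/tag/".toList ++ tag ++ "'>".toList ++ word ++ "</a>".toList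

-- ===== PORT A =====
-- A: words = content.split(" "); for i, word in enumerate(words): if word.startswith('#'):
--    words[i] = link; return " ".join(words).  The loop overwrites only the index it is
-- visiting, so the fold over enumerate of the original words below is exact.
def tag_content (content : String) : String :=
  let words := PySem.Chars.splitOn content.toList [' ']
  let words2 := (PySem.List.enumerate words 0).foldl
    (fun ws p =>
      if PySem.Chars.startswith p.2 ['#'] then
        ws.set p.1.toNat (pvLink (PySem.Chars.replace p.2 ['#'] []) p.2)
      else ws)
    words
  String.ofList (PySem.Chars.join [' '] words2)

-- ===== PORT B =====
-- B: j = rest.find(' '); tok = rest if j == -1 else rest[:j]; emit tok (linked if it starts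
-- with '#'), stop if j == -1, else emit ' ' and loop on rest[j+1:].  On a char list,
-- find(' ')/rest[:j]/rest[j+1:] are exactly takeWhile (· ≠ ' '), and dropWhile (· ≠ ' ')
-- (empty iff j == -1, else ' ' followed by rest[j+1:]); this rendering is exact.
def tag_scan (rest : List Char) : List Char :=
  let tok := rest.takeWhile (· ≠ ' ')
  (if PySem.Chars.startswith tok ['#'] then
      pvLink (PySem.Chars.replace tok ['#'] []) tok
    else tok) ++
  match h : rest.dropWhile (· ≠ ' ') with
  | [] => []
  | _ :: t => ' ' :: tag_scan t
termination_by rest.length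
decreasing_by
  have h1 : (rest.dropWhile (· ≠ ' ')).length ≤ rest.length := List.length_dropWhile_le _ _
  rw [h] at h1; simp at h1 ⊢; omega

def tag_content_alt (content : String) : String :=
  String.ofList (tag_scan content.toList)

-- ===== PRECONDITION & SPEC =====
def Spec_tag_content (content : String) (out : String) : Prop := out = tag_content_alt content
instance (content : String) (out : String) : Decidable (Spec_tag_content content out) := by unfold Spec_tag_content; infer_instance

-- ===== CLAIM (what is proved, stated in full; the proofs are below) =====
def Claim_equal_tag_content : Prop := ∀ (content : String), Dom_tag_content content → Spec_tag_content content (tag_content content)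

-- ===== LEMMAS AND PROOFS =====

-- structural description of split(" ") on a char list
def splitAux : List Char → List Char → List (List Char)
  | [], cur => [cur.reverse]
  | c :: t, cur => if c = ' ' then cur.reverse :: splitAux t [] else splitAux t (c :: cur)

theorem splitOn_go_eq (fuel : Nat) :
    ∀ (l cur : List Char) (acc : List (List Char)), l.length < fuel →
      PySem.Chars.splitOn.go [' '] fuel l cur acc = acc.reverse ++ splitAux l cur := by
  induction fuel with
  | zero => intro l cur acc h; omega
  | succ f ih =>
    intro l cur acc h
    cases l with
    | nil =>
      rw [PySem.Chars.splitOn.go]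
      · simp [splitAux]
      · omega
    | cons c rest =>
      by_cases hc : c = ' '
      · subst hc
        rw [PySem.Chars.splitOn.go, if_pos (by simp [List.isPrefixOf])]
        rw [show List.drop [' '].length (' ' :: rest) = rest by simp]
        rw [ih rest [] (List.reverse cur :: acc) (by simp at h ⊢; omega)]
        simp [splitAux]
      · rw [PySem.Chars.splitOn.go,
            if_neg (by simp [List.isPrefixOf]; exact fun hcc => (hc hcc.symm).elim)]
        rw [ih rest (c :: cur) acc (by simp at h ⊢; omega)]
        simp [splitAux, hc]

theorem splitOn_eq (l : List Char) :
    PySem.Chars.splitOn l [' '] = splitAux l [] := by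
  unfold PySem.Chars.splitOn
  rw [splitOn_go_eq (l.length + 1) l [] [] (by omega)]
  rfl

-- the per-word transformation both programs apply
def pvEmit (w : List Char) : List Char :=
  if PySem.Chars.startswith w ['#'] then pvLink (PySem.Chars.replace w ['#'] []) w else w

-- A's enumerate loop, which overwrites only the visited index, is map pvEmit
theorem foldl_set_enum (xs : List (List Char)) :
    ∀ (acc : List (List Char)) (n : Nat), acc.drop n = xs →
      (PySem.List.enumerate xs (n : Int)).foldl
        (fun ws p =>
          if PySem.Chars.startswith p.2 ['#'] then
            ws.set p.1.toNat (pvLink (PySem.Chars.replace p.2 ['#'] []) p.2)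
          else ws) acc
      = acc.take n ++ xs.map pvEmit := by
  induction xs with
  | nil =>
    intro acc n h
    have hn : acc.length ≤ n := by rw [← List.drop_eq_nil_iff]; exact h
    simp [PySem.List.enumerate_nil, List.take_of_length_le hn]
  | cons x xs ih =>
    intro acc n h
    have hn : n < acc.length := by
      by_contra hge
      rw [List.drop_eq_nil_of_le (by omega)] at h
      exact (List.cons_ne_nil _ _) h.symm
    have hget : acc[n]? = some x := by
      rw [← List.head?_drop, h]; rfl
    have hdrop1 : acc.drop (n + 1) = xs := by
      rw [List.drop_add_one_eq_tail_drop, h]; rfl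
    rw [PySem.List.enumerate_cons]
    simp only [List.foldl_cons]
    by_cases hs : PySem.Chars.startswith x ['#'] = true
    · rw [if_pos hs]
      set v := pvLink (PySem.Chars.replace x ['#'] []) x with hv
      have hset : acc.set ((n : Int)).toNat v = acc.set n v := by norm_num
      rw [hset]
      have hdropset : (acc.set n v).drop (n + 1) = xs := by
        rw [List.drop_set]; simp [hdrop1]
      have hrec := ih (acc.set n v) (n + 1) hdropset
      rw [show ((n : Int)) + 1 = ((n + 1 : Nat) : Int) by push_cast; ring, hrec]
      have htake : (acc.set n v).take (n + 1) = acc.take n ++ [v] := by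
        rw [List.set_eq_take_append_cons_drop, if_pos hn, List.take_append]
        simp [Nat.le_of_lt hn]
      rw [htake]
      simp only [pvEmit, hs, if_pos, List.map_cons, List.append_assoc, List.singleton_append]
      rw [hv]
    · rw [if_neg hs]
      have hrec := ih acc (n + 1) hdrop1
      rw [show ((n : Int)) + 1 = ((n + 1 : Nat) : Int) by push_cast; ring, hrec]
      rw [List.take_add_one, hget]
      simp [pvEmit, hs]

-- splitAux with accumulator, phrased the way the scan proceeds
theorem splitAux_shape (l : List Char) :
    ∀ cur, splitAux l cur
      = (cur.reverse ++ l.takeWhile (· ≠ ' ')) ::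
        (match l.dropWhile (· ≠ ' ') with
         | [] => ([] : List (List Char))
         | _ :: t => splitAux t []) := by
  induction l with
  | nil => intro cur; simp [splitAux]
  | cons c t ih =>
    intro cur
    by_cases hc : c = ' '
    · subst hc; simp [splitAux, List.takeWhile, List.dropWhile]
    · simp only [splitAux, if_neg hc]
      rw [ih (c :: cur)]
      simp [hc]

theorem intercalate_cons_cons (s a b : List Char) (l : List (List Char)) :
    s.intercalate (a :: b :: l) = a ++ s ++ s.intercalate (b :: l) := by
  simp [List.intercalate, List.intersperse]

-- unfolding tag_scan by the two outcomes of find(' ')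
theorem tag_scan_of_nil (l : List Char) (h : l.dropWhile (· ≠ ' ') = []) :
    tag_scan l = pvEmit (l.takeWhile (· ≠ ' ')) := by
  rw [tag_scan, pvEmit]
  split
  next =>
    split
    next => simp
    next x t heq => rw [h] at heq; cases heq
  next =>
    split
    next => simp
    next x t heq => rw [h] at heq; cases heq

theorem tag_scan_of_cons (l : List Char) (x : Char) (t : List Char)
    (h : l.dropWhile (· ≠ ' ') = x :: t) :
    tag_scan l = pvEmit (l.takeWhile (· ≠ ' ')) ++ ' ' :: tag_scan t := by
  rw [tag_scan, pvEmit]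
  split
  next =>
    split
    next heq => rw [h] at heq; cases heq
    next y u heq => rw [h] at heq; cases heq; rfl
  next =>
    split
    next heq => rw [h] at heq; cases heq
    next y u heq => rw [h] at heq; cases heq; rfl

-- the scan computes join(" ", map(pvEmit, split(" ", ·)))
theorem scan_eq_join (l : List Char) :
    tag_scan l = PySem.Chars.join [' '] ((splitAux l []).map pvEmit) := by
  rw [splitAux_shape l []]
  cases hdw : l.dropWhile (· ≠ ' ') with
  | nil =>
    rw [tag_scan_of_nil l hdw]
    simp [PySem.Chars.join, List.intercalate]
  | cons x t =>
    have ht : t.length < l.length := by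
      have h1 := List.length_dropWhile_le (fun c => decide (c ≠ ' ')) l
      rw [hdw] at h1; simp at h1; omega
    rw [tag_scan_of_cons l x t hdw, scan_eq_join t]
    simp only [hdw]
    rw [splitAux_shape t []]
    simp only [PySem.Chars.join, List.map_cons]
    rw [intercalate_cons_cons]
    simp
termination_by l.length
decreasing_by exact ht

-- ===== VERDICT (by name: the statement is the Claim_ definition above) =====
theorem tag_content_spec : Claim_equal_tag_content := by
  intro content _
  show tag_content content = tag_content_alt content
  simp only [tag_content, tag_content_alt, splitOn_eq]
  rw [show ((0 : Int)) = ((0 : Nat) : Int) by norm_num]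
  rw [foldl_set_enum (splitAux content.toList []) (splitAux content.toList []) 0 (by simp)]
  rw [scan_eq_join]
  simp
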